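-- pv_equiv track=rewrite | github.com/MajdCh2000/Uottawa-Python- | A3/A3_300217475.py | nonrepetitive
-- ===== SOURCE A (Python) =====
-- def nonrepetitive(s):
--     '''(str)=> bool
--     The function returns True if s is nonrepetitive and False otherwise.'''
--     for i in range(len(s)):
--         for j in range(i,len(s)):
--             s1 = s[i:j]
--             s2 = s[j:2*j - i]
--             if (s1 == s2 and s1 != ""):
--                 return False
--
--     return True
-- ===== SOURCE B (Python) =====
-- def nonrepetitive(s):
--     '''(str)=> bool
--     The function returns True if s is nonrepetitive and False otherwise.'''
--     n = len(s)
--     for L in range(1, n // 2 + 1):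
--         # a square with half-length L exists iff the "shift by L" match run
--         # s[k] == s[k+L] holds for L consecutive positions k
--         run = 0
--         for a, b in zip(s, s[L:]):
--             if a == b:
--                 run += 1
--                 if run >= L:
--                     return False
--             else:
--                 run = 0
--     return True
-- ===== Notes on version B (the rewrite author's own statement) =====
-- stated objective: faster
-- what changed: Instead of comparing the two slices s[i:j] and s[j:2j-i] for every index pair, B scans once per half-length L keeping a run counter of consecutive positions k with s[k]==s[k+L]; a run of length L is exactly a square, removing the per-pair slice construction and comparison.
import Mathlib
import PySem

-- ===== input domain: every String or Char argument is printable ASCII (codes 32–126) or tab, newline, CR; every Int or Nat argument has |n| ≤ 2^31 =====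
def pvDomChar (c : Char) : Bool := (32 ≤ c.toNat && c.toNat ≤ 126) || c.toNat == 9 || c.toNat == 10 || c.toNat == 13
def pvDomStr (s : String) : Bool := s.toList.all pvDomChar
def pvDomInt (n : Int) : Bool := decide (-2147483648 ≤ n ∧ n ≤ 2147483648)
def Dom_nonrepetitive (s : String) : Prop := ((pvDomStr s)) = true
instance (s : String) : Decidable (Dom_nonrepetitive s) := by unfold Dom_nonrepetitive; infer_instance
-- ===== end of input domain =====

-- B replaces A's per-pair slice comparison (every i ≤ j) by one run-counting scan per
-- half-length L, detecting L consecutive shift-L character matches; same Bool on every string.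


-- ===== PORT A =====
-- for i in range(len(s)): for j in range(i, len(s)):
--   s1 = s[i:j]; s2 = s[j:2*j-i]; if s1 == s2 and s1 != "": return False
-- return True      (the early 'return False' = the all-pairs test fails somewhere)
def nonrepetitive (s : String) : Bool :=
  let cs := s.toList
  let n : Int := cs.length
  (PySem.List.pyRange 0 n 1).all fun i =>
    (PySem.List.pyRange i n 1).all fun j =>
      let s1 := PySem.List.slice cs (some i) (some j)
      let s2 := PySem.List.slice cs (some j) (some (2 * j - i))
      !(decide (s1 = s2) && decide (s1 ≠ []))

-- ===== PORT B =====
-- inner loop of Source B: for (a, b) in zip(s, s[L:]): run counter; found when run >= L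
def runFind (L : Nat) : List (Char × Char) → Nat → Bool
  | [], _ => false
  | (a, b) :: ps, run =>
    if a = b then
      if run + 1 ≥ L then true else runFind L ps (run + 1)
    else runFind L ps 0

-- for L in range(1, n // 2 + 1): … return False …; return True   (L = k + 1, k < n/2)
def nonrepetitive_alt (s : String) : Bool :=
  let cs := s.toList
  let n := cs.length
  !((List.range (n / 2)).any fun k =>
      runFind (k + 1) (cs.zip (cs.drop (k + 1))) 0)

-- ===== PRECONDITION & SPEC =====
def Spec_nonrepetitive (s : String) (out : Bool) : Prop := out = nonrepetitive_alt s
instance (s : String) (out : Bool) : Decidable (Spec_nonrepetitive s out) := by unfold Spec_nonrepetitive; infer_instance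

-- ===== CLAIM (what is proved, stated in full; the proofs are below) =====
def Claim_equal_nonrepetitive : Prop := ∀ (s : String), Dom_nonrepetitive s → Spec_nonrepetitive s (nonrepetitive s)

-- ===== LEMMAS AND PROOFS =====

-- the common characterisation: a square of half-length L starting at position a
def SqCore (cs : List Char) (a L : Nat) : Prop :=
  a + 2 * L ≤ cs.length ∧ ∀ t < L, cs.getD (a + t) ' ' = cs.getD (a + L + t) ' '

lemma getD_take_drop (cs : List Char) (a t L : Nat) (d : Char)
    (ht : t < L) (h : a + t < cs.length) :
    ((cs.drop a).take L).getD t d = cs.getD (a + t) d := by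
  rw [List.getD_eq_getElem _ _ (by simp; omega), List.getD_eq_getElem _ _ (by omega)]
  simp [List.getElem_take, List.getElem_drop]

lemma slice_sq_iff (cs : List Char) (a L : Nat) (hL : 1 ≤ L) :
    ((cs.drop a).take L = (cs.drop (a + L)).take L ∧ (cs.drop a).take L ≠ []) ↔
      SqCore cs a L := by
  constructor
  · rintro ⟨heq, hne⟩
    have hlen := congrArg List.length heq
    simp only [List.length_take, List.length_drop] at hlen
    have hne' : ((cs.drop a).take L).length ≠ 0 := by
      simp only [ne_eq, List.length_eq_zero_iff]; exact hne
    simp only [List.length_take, List.length_drop] at hne'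
    have hbound : a + 2 * L ≤ cs.length := by omega
    refine ⟨hbound, fun t ht => ?_⟩
    have h1 : a + t < cs.length := by omega
    have h2 : a + L + t < cs.length := by omega
    calc cs.getD (a + t) ' ' = ((cs.drop a).take L).getD t ' ' :=
          (getD_take_drop cs a t L ' ' ht h1).symm
      _ = ((cs.drop (a + L)).take L).getD t ' ' := by rw [heq]
      _ = cs.getD (a + L + t) ' ' := getD_take_drop cs (a + L) t L ' ' ht h2
  · rintro ⟨hbound, hpt⟩
    constructor
    · apply List.ext_getElem
      · simp; omega
      · intro k h1 h2
        have hk : k < L := by simp at h1; omega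
        have e1 : ((cs.drop a).take L)[k] = ((cs.drop a).take L).getD k ' ' := by
          rw [List.getD_eq_getElem _ _ (by simpa using h1)]
        have e2 : ((cs.drop (a + L)).take L)[k] = ((cs.drop (a + L)).take L).getD k ' ' := by
          rw [List.getD_eq_getElem _ _ (by simpa using h2)]
        rw [e1, e2, getD_take_drop cs a k L ' ' hk (by omega),
          getD_take_drop cs (a + L) k L ' ' hk (by omega)]
        exact hpt k hk
    · have h0 : ((cs.drop a).take L).length ≠ 0 := by simp; omega
      rw [ne_eq, ← List.length_eq_zero_iff]
      exact h0

lemma A_true_iff (s : String) :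
    nonrepetitive s = true ↔
      ∀ i : Int, 0 ≤ i → i < s.toList.length → ∀ j : Int, i ≤ j → j < s.toList.length →
        ¬(PySem.List.slice s.toList (some i) (some j) =
            PySem.List.slice s.toList (some j) (some (2 * j - i)) ∧
          PySem.List.slice s.toList (some i) (some j) ≠ []) := by
  simp only [nonrepetitive, List.all_eq_true, PySem.List.mem_pyRange_one]
  constructor
  · intro h i h0 h1 j h2 h3
    have := h i ⟨h0, h1⟩ j ⟨h2, h3⟩
    simp at this
    tauto
  · intro h i hi j hj
    have := h i hi.1 hi.2 j hj.1 hj.2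
    simp
    tauto

lemma A_char (s : String) :
    nonrepetitive s = false ↔ ∃ a L, 1 ≤ L ∧ SqCore s.toList a L := by
  rw [Bool.eq_false_iff, ne_eq, A_true_iff]
  push_neg
  set cs := s.toList with hcs
  constructor
  · rintro ⟨i, h0, h1, j, h2, h3, heq, hne⟩
    set a := i.toNat with ha
    set b := j.toNat with hb
    have hab : a ≤ b := by omega
    have hbn : b < cs.length := by omega
    set L := b - a with hLdef
    have hi' : i = (a : Int) := by omega
    have hj' : j = (b : Int) := by omega
    rw [hi', hj', PySem.List.slice_natCast] at heq hne
    have h2j : 2 * (b : Int) - (a : Int) = ((b + L : Nat) : Int) := by push_cast; omega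
    rw [h2j, PySem.List.slice_natCast] at heq
    have hL1 : 1 ≤ L := by
      by_contra hc
      have : L = 0 := by omega
      apply hne
      simp [← hLdef, this]
    have hb' : b = a + L := by omega
    have htake : b + L - b = L := by omega
    rw [htake] at heq
    rw [hb'] at heq hne
    have := (slice_sq_iff cs a L hL1).mp ⟨by simpa using heq, by simpa using hne⟩
    exact ⟨a, L, hL1, this⟩
  · rintro ⟨a, L, hL1, hsq⟩
    have hn := hsq.1
    obtain ⟨heq, hne⟩ := (slice_sq_iff cs a L hL1).mpr hsq
    refine ⟨(a : Int), by omega, by omega, ((a + L : Nat) : Int), by omega,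
      by omega, ?_, ?_⟩
    · have h2j : 2 * ((a + L : Nat) : Int) - (a : Int) = ((a + L + L : Nat) : Int) := by
        push_cast; omega
      rw [h2j, PySem.List.slice_natCast, PySem.List.slice_natCast]
      have e1 : a + L - a = L := by omega
      have e2 : a + L + L - (a + L) = L := by omega
      rw [e1, e2]
      exact heq
    · rw [PySem.List.slice_natCast]
      have e1 : a + L - a = L := by omega
      rw [e1]
      exact hne

-- Bool-list version of runFind, for the run-length characterisation
def runFindB (L : Nat) : List Bool → Nat → Bool
  | [], _ => false
  | b :: bs, run =>
    if b then
      if run + 1 ≥ L then true else runFindB L bs (run + 1)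
    else runFindB L bs 0

lemma runFind_eq_runFindB (L : Nat) (ps : List (Char × Char)) (r : Nat) :
    runFind L ps r = runFindB L (ps.map fun p => decide (p.1 = p.2)) r := by
  induction ps generalizing r with
  | nil => rfl
  | cons p ps ih =>
    obtain ⟨a, b⟩ := p
    by_cases h : a = b <;> simp [runFind, runFindB, h, ih]

lemma getD_replicate_append (r : Nat) (bs : List Bool) (k : Nat) :
    (List.replicate r true ++ bs).getD k false =
      if k < r then true else bs.getD (k - r) false := by
  rw [List.getD_eq_getElem?_getD, List.getD_eq_getElem?_getD]
  by_cases h : k < r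
  · rw [List.getElem?_append_left (by simpa using h)]
    simp [h]
  · rw [List.getElem?_append_right (by simp; omega)]
    simp [h, List.length_replicate]

-- runFindB with a virtual prefix of r matches finds exactly a window of L consecutive trues
lemma runFindB_iff (L : Nat) (bs : List Bool) (r : Nat) (hr : r < L) :
    runFindB L bs r = true ↔
      ∃ i, i + L ≤ r + bs.length ∧
        ∀ t < L, (List.replicate r true ++ bs).getD (i + t) false = true := by
  induction bs generalizing r with
  | nil =>
    simp only [runFindB, List.length_nil, List.append_nil]
    constructor
    · intro h; cases h
    · rintro ⟨i, hi, _⟩; omega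
  | cons b bs ih =>
    by_cases hb : b = true
    · subst hb
      by_cases hL : r + 1 ≥ L
      · have hrL : r + 1 = L := by omega
        have hrun : runFindB L (true :: bs) r = true := by simp [runFindB, hL]
        rw [hrun]
        simp only [true_iff]
        refine ⟨0, by simp; omega, ?_⟩
        intro t ht
        rw [getD_replicate_append]
        by_cases htr : t < r
        · simp [htr]
        · have : t = r := by omega
          simp [this]
      · have h1 : runFindB L (true :: bs) r = runFindB L bs (r + 1) := by
          simp [runFindB, hL]
        rw [h1, ih (r + 1) (by omega)]
        have hlist : List.replicate (r+1) true ++ bs = List.replicate r true ++ true :: bs := by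
          rw [List.replicate_succ']; simp
        rw [hlist]
        constructor
        · rintro ⟨i, hi, hg⟩; exact ⟨i, by simp at hi ⊢; omega, hg⟩
        · rintro ⟨i, hi, hg⟩; exact ⟨i, by simp at hi ⊢; omega, hg⟩
    · have hb' : b = false := by simpa using hb
      subst hb'
      have h1 : runFindB L (false :: bs) r = runFindB L bs 0 := by simp [runFindB]
      rw [h1, ih 0 (by omega)]
      simp only [List.replicate_zero, List.nil_append]
      constructor
      · rintro ⟨i, hi, hg⟩
        refine ⟨r + 1 + i, by simp; omega, ?_⟩
        intro t ht
        rw [getD_replicate_append, if_neg (by omega)]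
        have : r + 1 + i + t - r = i + t + 1 := by omega
        rw [this]
        simpa using hg t ht
      · rintro ⟨i, hi, hg⟩
        -- the window of trues cannot contain index r (value false), so it starts after it
        have hir : r < i := by
          by_contra hcon
          push_neg at hcon
          have := hg (r - i) (by omega)
          rw [getD_replicate_append, if_neg (by omega)] at this
          have h3 : i + (r - i) - r = 0 := by omega
          rw [h3] at this
          simp at this
        refine ⟨i - (r + 1), by simp at hi; omega, ?_⟩
        intro t ht
        have := hg t ht
        rw [getD_replicate_append, if_neg (by omega)] at this
        have h4 : i + t - r = (i - (r + 1) + t) + 1 := by omega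
        rw [h4] at this
        simpa using this

lemma matchList_getD (cs : List Char) (L k : Nat) (hk : k + L < cs.length) :
    ((cs.zip (cs.drop L)).map fun p => decide (p.1 = p.2)).getD k false =
      decide (cs.getD k ' ' = cs.getD (k + L) ' ') := by
  have hlen : (cs.zip (cs.drop L)).length = cs.length - L := by
    simp only [List.length_zip, List.length_drop]; omega
  rw [List.getD_eq_getElem _ _ (by simp only [List.length_map, hlen]; omega)]
  simp only [List.getElem_map, List.getElem_zip, List.getElem_drop]
  rw [List.getD_eq_getElem _ _ (by omega), List.getD_eq_getElem _ _ (by omega)]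
  simp [Nat.add_comm L k]

lemma B_char (s : String) :
    nonrepetitive_alt s = false ↔ ∃ a L, 1 ≤ L ∧ SqCore s.toList a L := by
  set cs := s.toList with hcs
  have h1 : nonrepetitive_alt s = false ↔
      ∃ k < cs.length / 2, runFind (k + 1) (cs.zip (cs.drop (k + 1))) 0 = true := by
    simp [nonrepetitive_alt, List.any_eq_true, List.mem_range, ← hcs]
  rw [h1]
  have hzlen : ∀ L : Nat, (cs.zip (cs.drop L)).length = cs.length - L := by
    intro L; simp only [List.length_zip, List.length_drop]; omega
  constructor
  · rintro ⟨k, hk, hrun⟩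
    set L := k + 1 with hL
    rw [runFind_eq_runFindB] at hrun
    obtain ⟨i, hi, hall⟩ := (runFindB_iff L _ 0 (by omega)).mp hrun
    simp only [List.replicate_zero, List.nil_append, List.length_map, hzlen, Nat.zero_add] at hi hall
    refine ⟨i, L, by omega, by omega, fun t ht => ?_⟩
    have := hall t ht
    rw [matchList_getD cs L (i + t) (by omega)] at this
    have e : i + t + L = i + L + t := by omega
    rw [e] at this
    exact of_decide_eq_true this
  · rintro ⟨a, L, hL1, hbound, hpt⟩
    refine ⟨L - 1, by omega, ?_⟩
    have hL' : L - 1 + 1 = L := by omega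
    rw [hL', runFind_eq_runFindB]
    rw [runFindB_iff L _ 0 (by omega)]
    refine ⟨a, by simp only [List.length_map, hzlen]; omega, fun t ht => ?_⟩
    simp only [List.replicate_zero, List.nil_append]
    rw [matchList_getD cs L (a + t) (by omega)]
    have e : a + t + L = a + L + t := by omega
    rw [e]
    exact decide_eq_true (hpt t ht)

-- ===== VERDICT (by name: the statement is the Claim_ definition above) =====
theorem nonrepetitive_spec : Claim_equal_nonrepetitive := by
  intro s _
  unfold Spec_nonrepetitive
  cases hA : nonrepetitive s <;> cases hb : nonrepetitive_alt s
  · rfl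
  · exact absurd ((B_char s).mpr ((A_char s).mp hA)) (by simp [hb])
  · exact absurd ((A_char s).mpr ((B_char s).mp hb)) (by simp [hA])
  · rfl
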